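-- pv_equiv track=rewrite | github.com/yenhao-huang/japcomic2twcomic | lib/text_allocater/text_allocater.py | _split_text_even
-- ===== SOURCE A (Python) =====
-- from typing import List, Dict, Tuple, Literal
--
-- def _split_text_even(
--
--     text: str,
--     num_boxes: int
-- ) -> List[str]:
--     """
--     策略 1: 均分策略 - 根據字數平均分配
--
--     Args:
--         text: 要分割的文字
--         num_boxes: box 的數量
--
--     Returns:
--         List[str]: 分割後的文字列表
--     """
--     if num_boxes <= 0:
--         return []
--
--     if num_boxes == 1:
--         return [text]
--
--     text_length = len(text)
--     chars_per_box = text_length // num_boxes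
--     remainder = text_length % num_boxes
--
--     parts = []
--     start = 0
--
--     for i in range(num_boxes):
--         # Distribute remainder evenly
--         length = chars_per_box + (1 if i < remainder else 0)
--         end = start + length
--         parts.append(text[start:end])
--         start = end
--
--     return parts
-- ===== SOURCE B (Python) =====
-- def _split_text_even(text, num_boxes):
--     parts = []
--     rest = text
--     for k in range(num_boxes, 0, -1):
--         head = -(-len(rest) // k)  # ceil: the first of k boxes gets the larger share
--         parts.append(rest[:head])
--         rest = rest[head:]
--     return parts
-- ===== Notes on version B (the rewrite author's own statement) =====
-- stated objective: alternative
-- what changed: Replaces A's precomputed quotient/remainder and running start index over the fixed text by successive peeling: repeatedly slice the ceiling share ceil(len(rest)/k) off the front of the remaining suffix while counting the boxes left down, so no chunk size or boundary is precomputed and the guards for num_boxes<=0 and ==1 disappear; it trades speed for this, since re-slicing the suffix copies it each round.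
import Mathlib
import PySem

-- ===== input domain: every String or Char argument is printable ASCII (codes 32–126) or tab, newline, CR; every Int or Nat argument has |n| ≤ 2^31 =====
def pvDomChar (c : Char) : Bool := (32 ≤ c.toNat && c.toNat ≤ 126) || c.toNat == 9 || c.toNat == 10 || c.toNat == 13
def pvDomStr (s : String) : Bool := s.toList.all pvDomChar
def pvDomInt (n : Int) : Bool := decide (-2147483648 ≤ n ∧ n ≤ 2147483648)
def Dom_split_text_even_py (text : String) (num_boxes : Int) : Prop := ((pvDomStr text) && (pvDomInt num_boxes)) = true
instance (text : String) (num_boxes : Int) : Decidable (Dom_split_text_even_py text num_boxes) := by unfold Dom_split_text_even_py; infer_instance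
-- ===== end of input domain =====

-- B replaces A's precomputed quotient/remainder and running start index by successive peeling of a
-- ceiling-sized head chunk off the remaining suffix, counting the boxes left down; objective: alternative.

-- ===== PORT A =====
def split_text_even_py (text : String) (num_boxes : Int) : List String :=
  if num_boxes ≤ 0 then []
  else if num_boxes = 1 then [text]
  else
    let text_length : Int := PySem.Str.len text
    let chars_per_box : Int := PySem.Int.floordiv text_length num_boxes
    let remainder : Int := PySem.Int.mod text_length num_boxes
    let res := (PySem.List.pyRange 0 num_boxes 1).foldl
      (fun (st : List String × Int) i =>
        let length := chars_per_box + (if i < remainder then 1 else 0)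
        let e := st.2 + length
        (st.1 ++ [PySem.Str.slice text (some st.2) (some e)], e))
      ([], 0)
    res.1

-- ===== PORT B =====
def split_text_even_py_alt (text : String) (num_boxes : Int) : List String :=
  ((PySem.List.pyRange num_boxes 0 (-1)).foldl
    (fun (st : List String × String) k =>
      let head : Int := -(PySem.Int.floordiv (-(PySem.Str.len st.2)) k)
      (st.1 ++ [PySem.Str.slice st.2 none (some head)],
       PySem.Str.slice st.2 (some head) none))
    ([], text)).1

-- ===== PRECONDITION & SPEC =====
def Spec_split_text_even_py (text : String) (num_boxes : Int) (out : List String) : Prop := out = split_text_even_py_alt text num_boxes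
instance (text : String) (num_boxes : Int) (out : List String) : Decidable (Spec_split_text_even_py text num_boxes out) := by unfold Spec_split_text_even_py; infer_instance

-- ===== CLAIM (what is proved, stated in full; the proofs are below) =====
def Claim_equal_split_text_even_py : Prop := ∀ (text : String) (num_boxes : Int), Dom_split_text_even_py text num_boxes → Spec_split_text_even_py text num_boxes (split_text_even_py text num_boxes)

-- ===== LEMMAS AND PROOFS =====

-- the common closed-form description both ports are reduced to: chunk i of c is text[i*q+min(i,r) : (i+1)*q+min(i+1,r)]
def pvCF (u : String) (c : Int) : List String :=
  (PySem.List.pyRange 0 c 1).map (fun i =>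
    PySem.Str.slice u
      (some (i * PySem.Int.floordiv (PySem.Str.len u) c + min i (PySem.Int.mod (PySem.Str.len u) c)))
      (some ((i + 1) * PySem.Int.floordiv (PySem.Str.len u) c + min (i + 1) (PySem.Int.mod (PySem.Str.len u) c))))

lemma slice_full (s : String) : PySem.Str.slice s (some 0) (some (PySem.Str.len s)) = s := by
  have h : (PySem.Str.slice s (some 0) (some (PySem.Str.len s))).toList = s.toList := by
    simp [PySem.Str.toList_slice, PySem.List.slice_to]
  exact String.toList_injective h

lemma str_slice_zero (s : String) (b? : Option Int) :
    PySem.Str.slice s (some 0) b? = PySem.Str.slice s none b? := by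
  apply String.toList_injective
  simp [PySem.Str.toList_slice]

-- ceiling division -((-n)//c) = n//c + (1 if n%c>0 else 0), for c > 0
lemma ceil_div_eq (n c : Int) (hc : 0 < c) :
    -(PySem.Int.floordiv (-n) c)
      = PySem.Int.floordiv n c + (if 0 < PySem.Int.mod n c then 1 else 0) := by
  have hdm := PySem.Int.floordiv_mul_add_mod n c
  have hr0 := PySem.Int.mod_nonneg n hc
  have hrc := PySem.Int.mod_lt n hc
  rw [PySem.Int.neg_floordiv_neg_eq_iff_of_pos hc]
  constructor <;> · split_ifs <;> nlinarith

-- a slice of the dropped-head suffix is a shifted slice of the original string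
lemma tail_chunk (u : String) (h a b : Int) (h0 : 0 ≤ h) (ha : 0 ≤ a) (hb : 0 ≤ b) :
    PySem.Str.slice (PySem.Str.slice u (some h) none) (some a) (some b)
      = PySem.Str.slice u (some (h + a)) (some (h + b)) := by
  apply String.toList_injective
  simp only [PySem.Str.toList_slice, PySem.Chars.slice_eq_listSlice]
  rw [PySem.List.slice_from _ h0, PySem.List.slice_toNat _ ha hb,
      PySem.List.slice_toNat _ (by omega) (by omega), List.drop_drop]
  congr 1
  · omega
  · congr 1; omega

-- A-side invariant: entering iteration a, the running start equals a*q + min a r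
lemma loop_inv (text : String) (q r : Int) :
    ∀ (m : Nat) (a b : Int), (b - a).toNat = m →
    ∀ (acc : List String),
    ((PySem.List.pyRange a b 1).foldl
        (fun (st : List String × Int) i =>
          (st.1 ++ [PySem.Str.slice text (some st.2)
                      (some (st.2 + (q + (if i < r then 1 else 0))))],
           st.2 + (q + (if i < r then 1 else 0))))
        (acc, a * q + min a r)).1
      = acc ++ (PySem.List.pyRange a b 1).map
          (fun i => PySem.Str.slice text (some (i * q + min i r))
              (some ((i + 1) * q + min (i + 1) r))) := by
  intro m
  induction m with
  | zero =>
      intro a b hab acc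
      rw [PySem.List.pyRange_one_eq_nil (by omega)]
      simp
  | succ k ih =>
      intro a b hab acc
      have hlt : a < b := by omega
      rw [PySem.List.pyRange_one_cons hlt]
      have hstep : a * q + min a r + (q + (if a < r then 1 else 0))
          = (a + 1) * q + min (a + 1) r := by
        have : (a + 1) * q = a * q + q := by ring
        rw [this]; split_ifs <;> omega
      simp only [List.foldl_cons, List.map_cons, hstep]
      rw [ih (a + 1) b (by omega) (acc ++ [_])]
      simp

lemma A_eq_CF (text : String) (num_boxes : Int) (hpos : 0 < num_boxes) :
    split_text_even_py text num_boxes = pvCF text num_boxes := by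
  unfold split_text_even_py pvCF
  simp only [show ¬ num_boxes ≤ 0 by omega, if_false]
  set n : Int := PySem.Str.len text with hn
  set q : Int := PySem.Int.floordiv n num_boxes with hq
  set r : Int := PySem.Int.mod n num_boxes with hrdef
  have hr : 0 ≤ r := PySem.Int.mod_nonneg n hpos
  have key := loop_inv text q r (num_boxes - 0).toNat 0 num_boxes rfl []
  have h00 : (0 : Int) * q + min 0 r = 0 := by
    have : min (0 : Int) r = 0 := by omega
    rw [this]; ring
  rw [h00] at key
  by_cases h1 : num_boxes = 1
  · subst h1
    rw [if_pos rfl]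
    have hq1 : q = n := by simp [hq, PySem.Int.floordiv]
    have hr1 : r = 0 := by simp [hrdef, PySem.Int.mod]
    rw [PySem.List.pyRange_one_cons (by norm_num : (0:Int) < 1),
        show ((0:Int) + 1) = 1 by norm_num,
        PySem.List.pyRange_one_eq_nil (le_refl (1:Int))]
    simp only [List.map_cons, List.map_nil, hq1, hr1]
    norm_num
    rw [hn]
    exact (slice_full text).symm
  · simp only [h1, if_false]
    exact key

-- B-side invariant: peeling ceiling-sized heads off the suffix u with c boxes left yields pvCF u c
set_option maxHeartbeats 1000000 in
lemma B_loop :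
    ∀ (m : Nat) (c : Int), 0 ≤ c → c.toNat = m → ∀ (u : String) (acc : List String),
    ((PySem.List.pyRange c 0 (-1)).foldl
        (fun (st : List String × String) k =>
          (st.1 ++ [PySem.Str.slice st.2 none
                      (some (-(PySem.Int.floordiv (-(PySem.Str.len st.2)) k)))],
           PySem.Str.slice st.2 (some (-(PySem.Int.floordiv (-(PySem.Str.len st.2)) k))) none))
        (acc, u)).1
      = acc ++ pvCF u c := by
  intro m
  induction m with
  | zero =>
      intro c hc0 hcm u acc
      have : c = 0 := by omega
      subst this
      rw [PySem.List.pyRange_neg_one_eq_nil (le_refl 0)]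
      simp [pvCF, PySem.List.pyRange_one_eq_nil (le_refl (0:Int))]
  | succ mm ih =>
      intro c hc0 hcm u acc
      have hc : 0 < c := by omega
      rw [PySem.List.pyRange_neg_one_cons hc]
      set n : Int := PySem.Str.len u with hn
      have hn0 : 0 ≤ n := by
        rw [hn, PySem.Str.len_eq]; positivity
      set q : Int := PySem.Int.floordiv n c with hqdef
      set r : Int := PySem.Int.mod n c with hrdef
      have hr0 : 0 ≤ r := PySem.Int.mod_nonneg n hc
      have hrc : r < c := PySem.Int.mod_lt n hc
      have hdm : q * c + r = n := PySem.Int.floordiv_mul_add_mod n c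
      have hq0 : 0 ≤ q := by
        rw [hqdef, PySem.Int.floordiv_eq_ediv_of_pos hc]
        exact Int.ediv_nonneg hn0 (by omega)
      have hhead : -(PySem.Int.floordiv (-n) c) = q + (if 0 < r then 1 else 0) :=
        ceil_div_eq n c hc
      set head : Int := q + (if 0 < r then 1 else 0) with hheaddef
      have hhead0 : 0 ≤ head := by rw [hheaddef]; split_ifs <;> omega
      have hheadn : head ≤ n := by
        rw [hheaddef]; split_ifs <;> nlinarith
      set u' : String := PySem.Str.slice u (some head) none with hu'
      have hlen' : PySem.Str.len u' = n - head := by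
        rw [hu', PySem.Str.len_eq, PySem.Str.toList_slice, PySem.Chars.slice_eq_listSlice,
            PySem.List.slice_from _ hhead0, List.length_drop]
        have h1 : n = (u.toList.length : Int) := by rw [hn, PySem.Str.len_eq]
        omega
      have hheadu : -(PySem.Int.floordiv (-(PySem.Str.len u)) c) = head := by
        rw [← hn]; exact hhead
      simp only [List.foldl_cons]
      rw [hheadu, ← hu']
      -- fold body on the cons'd element, with head rewritten
      have step1 :
          ((PySem.List.pyRange (c - 1) 0 (-1)).foldl
            (fun (st : List String × String) k =>
              (st.1 ++ [PySem.Str.slice st.2 none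
                          (some (-(PySem.Int.floordiv (-(PySem.Str.len st.2)) k)))],
               PySem.Str.slice st.2 (some (-(PySem.Int.floordiv (-(PySem.Str.len st.2)) k))) none))
            (acc ++ [PySem.Str.slice u none (some head)], u')).1
          = (acc ++ [PySem.Str.slice u none (some head)]) ++ pvCF u' (c - 1) :=
        ih (c - 1) (by omega) (by omega) u' _
      rw [step1]
      -- now show acc ++ [u[:head]] ++ pvCF u' (c-1) = acc ++ pvCF u c
      rw [List.append_assoc]
      congr 1
      -- first chunk of pvCF u c is u[:head]
      unfold pvCF
      rw [PySem.List.pyRange_one_cons hc, List.map_cons]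
      rw [← hn, ← hqdef, ← hrdef]
      have hb0 : (0 : Int) * q + min 0 r = 0 := by
        have : min (0 : Int) r = 0 := by omega
        rw [this]; ring
      have hb1 : ((0 : Int) + 1) * q + min ((0 : Int) + 1) r = head := by
        have h1 : ((0 : Int) + 1) * q = q := by ring
        rw [h1, hheaddef]; split_ifs <;> omega
      rw [hb0, hb1, str_slice_zero, List.singleton_append]
      refine congrArg (List.cons _) ?_
      -- tails: reindex pyRange 1 c over pyRange 0 (c-1)
      by_cases hc1 : c = 1
      · subst hc1
        rw [show (0:Int) + 1 = 1 by norm_num,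
            PySem.List.pyRange_one_eq_nil (le_refl (1:Int)),
            PySem.List.pyRange_one_eq_nil (by norm_num : (1:Int) - 1 ≤ 0)]
        simp
      · have hc2 : 2 ≤ c := by omega
        -- quotient and remainder of the suffix
        set r' : Int := if 0 < r then r - 1 else 0 with hr'def
        have hdecomp : n - head = q * (c - 1) + r' := by
          rw [hheaddef, hr'def]
          split_ifs <;> nlinarith
        have hr'b : 0 ≤ r' ∧ r' < c - 1 := by
          rw [hr'def]; split_ifs <;> omega
        have hq' : PySem.Int.floordiv (n - head) (c - 1) = q := by
          rw [PySem.Int.floordiv_eq_iff_of_pos (by omega : (0:Int) < c - 1)]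
          constructor <;> nlinarith [hr'b.1, hr'b.2]
        have hr' : PySem.Int.mod (n - head) (c - 1) = r' := by
          have := PySem.Int.floordiv_mul_add_mod (n - head) (c - 1)
          rw [hq'] at this
          omega
        rw [hlen', hq', hr']
        rw [show (0:Int) + 1 = 1 by norm_num,
            PySem.List.pyRange_one (0 : Int) (c - 1), PySem.List.pyRange_one 1 c,
            show ((c : Int) - 1 - 0).toNat = (c - 1).toNat by omega,
            List.map_map, List.map_map]
        apply List.map_congr_left
        intro k hk
        simp only [Function.comp_apply]
        rw [show (0 : Int) + (k : Int) = (k : Int) by ring]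
        have hk0 : (0 : Int) ≤ (k : Int) := by positivity
        rw [tail_chunk u head _ _ hhead0
              (by have hm := le_min hk0 hr'b.1
                  nlinarith [mul_nonneg hk0 hq0])
              (by have hm := le_min (by omega : (0:Int) ≤ (k:Int) + 1) hr'b.1
                  nlinarith [mul_nonneg (by omega : (0:Int) ≤ (k:Int) + 1) hq0])]
        have harith : ∀ (i : Int), 0 ≤ i →
            head + (i * q + min i r') = (1 + i) * q + min (1 + i) r := by
          intro i hi
          rw [hheaddef, hr'def, show (1 + i) * q = i * q + q by ring]
          split_ifs <;> · generalize i * q = z; omega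
        rw [harith (k : Int) hk0, harith ((k : Int) + 1) (by omega),
            show (1 : Int) + ((k : Int) + 1) = 1 + (k : Int) + 1 by ring]

lemma ports_agree (text : String) (num_boxes : Int) :
    split_text_even_py text num_boxes = split_text_even_py_alt text num_boxes := by
  by_cases h0 : num_boxes ≤ 0
  · unfold split_text_even_py split_text_even_py_alt
    rw [if_pos h0, PySem.List.pyRange_neg_one_eq_nil (by omega)]
    simp
  · have hpos : 0 < num_boxes := by omega
    rw [A_eq_CF text num_boxes hpos]
    unfold split_text_even_py_alt
    rw [B_loop num_boxes.toNat num_boxes (by omega) rfl text []]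
    simp

-- ===== VERDICT (by name: the statement is the Claim_ definition above) =====
theorem split_text_even_py_spec : Claim_equal_split_text_even_py := by
  intro text num_boxes _
  unfold Spec_split_text_even_py
  exact ports_agree text num_boxes
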